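-- pv_equiv track=rewrite | github.com/anupyadav27/lab | rule_finalisation/archived_scripts_20251109/consolidate_compliance_rules.py | infer_service_from_checks
-- ===== SOURCE A (Python) =====
-- def infer_service_from_checks(checks):
--     """Infer primary service from check names"""
--     if not checks or checks == '' or checks == 'NA':
--         return 'NA'
--
--     # Extract service prefixes
--     services = set()
--     for check in checks.split(';'):
--         check = check.strip()
--         if '_' in check:
--             parts = check.split('_')
--             if len(parts) >= 2:
--                 services.add(parts[1])  # e.g., aws_iam_xxx -> iam
--
--     if len(services) == 0:
--         return 'NA'
--     elif len(services) == 1: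
--         return list(services)[0].upper()
--     else:
--         return 'Multiple'
-- ===== SOURCE B (Python) =====
-- def infer_service_from_checks(checks):
--     """Infer primary service from check names"""
--     if not checks or checks == '' or checks == 'NA':
--         return 'NA'
--     service = None
--     multiple = False
--     for check in checks.split(';'):
--         check = check.strip()
--         if '_' in check:
--             parts = check.split('_')
--             if len(parts) >= 2:
--                 svc = parts[1]
--                 if service is None:
--                     service = svc
--                 elif svc != service:
--                     multiple = True
--                     break
--     if service is None:
--         return 'NA'
--     if multiple:
--         return 'Multiple'
--     return service.upper()
-- ===== Notes on version B (the rewrite author's own statement) =====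
-- stated objective: simpler
-- what changed: Replaces the set of all service prefixes (built in full, then sized) with a single scalar `service` plus a `multiple` flag and an early break at the first differing prefix, so no set is ever materialised.
import Mathlib
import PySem

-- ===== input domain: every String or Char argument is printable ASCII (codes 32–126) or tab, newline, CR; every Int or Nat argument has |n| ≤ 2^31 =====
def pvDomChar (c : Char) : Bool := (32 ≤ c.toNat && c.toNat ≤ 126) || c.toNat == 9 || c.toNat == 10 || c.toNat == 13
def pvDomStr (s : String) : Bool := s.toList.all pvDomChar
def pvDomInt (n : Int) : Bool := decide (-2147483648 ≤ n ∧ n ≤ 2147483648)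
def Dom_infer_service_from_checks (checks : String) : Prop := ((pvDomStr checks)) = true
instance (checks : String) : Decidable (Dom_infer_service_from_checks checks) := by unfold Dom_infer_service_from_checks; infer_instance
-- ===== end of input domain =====

-- B replaces A's set of all prefixes by a single scalar + 'multiple' flag with an early break (simpler; return value only, no mutation).

-- ===== PORT A =====
-- separators ";" and "_" are non-empty, so PySem.Str.split? is always `some`; `.getD []` is never taken
def infer_service_from_checks (checks : String) : String :=
  if checks = "" ∨ checks = "NA" then "NA"
  else
    let services : PySem.Set String :=
      ((PySem.Str.split? checks ";").getD []).foldl (fun services check0 =>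
        let check := PySem.Str.strip check0
        if PySem.Str.isIn "_" check then
          let parts := (PySem.Str.split? check "_").getD []
          if parts.length ≥ 2 then PySem.Set.add services (parts.getD 1 "") else services
        else services) PySem.Set.empty
    if services.length = 0 then "NA"
    else if services.length = 1 then PySem.Str.upper (services.getD 0 "")
    else "Multiple"

-- ===== PORT B =====
-- loop of Source B: carries (service, multiple); returns at the first differing prefix (the 'break')
def pvBLoop : List String → Option String → Option String × Bool
  | [], service => (service, false)
  | check0 :: rest, service =>
    let check := PySem.Str.strip check0
    if PySem.Str.isIn "_" check then
      let parts := (PySem.Str.split? check "_").getD []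
      if parts.length ≥ 2 then
        let svc := parts.getD 1 ""
        match service with
        | none => pvBLoop rest (some svc)
        | some s => if svc ≠ s then (some s, true) else pvBLoop rest (some s)
      else pvBLoop rest service
    else pvBLoop rest service

def infer_service_from_checks_alt (checks : String) : String :=
  if checks = "" ∨ checks = "NA" then "NA"
  else
    match pvBLoop ((PySem.Str.split? checks ";").getD []) none with
    | (none, _) => "NA"
    | (some s, multiple) => if multiple then "Multiple" else PySem.Str.upper s

-- ===== PRECONDITION & SPEC =====
def Spec_infer_service_from_checks (checks : String) (out : String) : Prop := out = infer_service_from_checks_alt checks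
instance (checks : String) (out : String) : Decidable (Spec_infer_service_from_checks checks out) := by unfold Spec_infer_service_from_checks; infer_instance

-- ===== CLAIM (what is proved, stated in full; the proofs are below) =====
def Claim_equal_infer_service_from_checks : Prop := ∀ (checks : String), Dom_infer_service_from_checks checks → Spec_infer_service_from_checks checks (infer_service_from_checks checks)

-- ===== LEMMAS AND PROOFS =====

-- what one check contributes: [its prefix] or nothing
def pvStep1 (check0 : String) : List String :=
  if PySem.Str.isIn "_" (PySem.Str.strip check0) then
    if ((PySem.Str.split? (PySem.Str.strip check0) "_").getD []).length ≥ 2 then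
      [((PySem.Str.split? (PySem.Str.strip check0) "_").getD []).getD 1 ""]
    else []
  else []

-- the list of extracted service prefixes, in order
def pvExtract (l : List String) : List String := l.flatMap pvStep1

theorem pvExtract_cons (c : String) (l : List String) :
    pvExtract (c :: l) = pvStep1 c ++ pvExtract l := by
  simp [pvExtract]

theorem pvStep_fold (acc : PySem.Set String) (c : String) :
    (if PySem.Str.isIn "_" (PySem.Str.strip c) then
       if ((PySem.Str.split? (PySem.Str.strip c) "_").getD []).length ≥ 2 then
         PySem.Set.add acc (((PySem.Str.split? (PySem.Str.strip c) "_").getD []).getD 1 "")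
       else acc
     else acc) = (pvStep1 c).foldl PySem.Set.add acc := by
  simp only [pvStep1]
  split_ifs <;> rfl

theorem pvAFold_eq (l : List String) (acc : PySem.Set String) :
    l.foldl (fun services check0 =>
        let check := PySem.Str.strip check0
        if PySem.Str.isIn "_" check then
          let parts := (PySem.Str.split? check "_").getD []
          if parts.length ≥ 2 then PySem.Set.add services (parts.getD 1 "") else services
        else services) acc = (pvExtract l).foldl PySem.Set.add acc := by
  induction l generalizing acc with
  | nil => rfl
  | cons c rest ih =>
    rw [List.foldl_cons, pvExtract_cons, List.foldl_append, ih]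
    exact congrArg (fun a => List.foldl PySem.Set.add a (pvExtract rest)) (pvStep_fold acc c)

theorem pvBLoop_some (l : List String) (s : String) :
    pvBLoop l (some s) = (some s, !(pvExtract l).all (· == s)) := by
  induction l with
  | nil => rfl
  | cons c rest ih =>
    rw [pvBLoop]
    simp only []
    by_cases h1 : PySem.Str.isIn "_" (PySem.Str.strip c) = true
    · rw [if_pos h1]
      by_cases h2 : ((PySem.Str.split? (PySem.Str.strip c) "_").getD []).length ≥ 2
      · rw [if_pos h2]
        have hcons : pvExtract (c :: rest)
            = ((PySem.Str.split? (PySem.Str.strip c) "_").getD []).getD 1 "" :: pvExtract rest := by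
          rw [pvExtract_cons]
          simp only [pvStep1]
          rw [if_pos h1, if_pos h2]
          rfl
        rw [hcons]
        generalize ((PySem.Str.split? (PySem.Str.strip c) "_").getD []).getD 1 "" = v
        by_cases h3 : v = s
        · rw [if_neg (by simp [h3]), ih]
          simp [List.all_cons, h3]
        · rw [if_pos h3]
          simp [List.all_cons, h3]
      · rw [if_neg h2]
        have hcons : pvExtract (c :: rest) = pvExtract rest := by
          rw [pvExtract_cons]
          simp only [pvStep1]
          rw [if_pos h1, if_neg h2]
          rfl
        rw [hcons, ih]
    · rw [if_neg h1]
      have hcons : pvExtract (c :: rest) = pvExtract rest := by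
        rw [pvExtract_cons]
        simp only [pvStep1]
        rw [if_neg h1]
        rfl
      rw [hcons, ih]

theorem pvBLoop_none (l : List String) :
    pvBLoop l none = match pvExtract l with
      | [] => (none, false)
      | h :: t => (some h, !t.all (· == h)) := by
  induction l with
  | nil => rfl
  | cons c rest ih =>
    rw [pvBLoop]
    simp only []
    by_cases h1 : PySem.Str.isIn "_" (PySem.Str.strip c) = true
    · rw [if_pos h1]
      by_cases h2 : ((PySem.Str.split? (PySem.Str.strip c) "_").getD []).length ≥ 2
      · rw [if_pos h2]
        have hcons : pvExtract (c :: rest)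
            = ((PySem.Str.split? (PySem.Str.strip c) "_").getD []).getD 1 "" :: pvExtract rest := by
          rw [pvExtract_cons]
          simp only [pvStep1]
          rw [if_pos h1, if_pos h2]
          rfl
        rw [hcons, pvBLoop_some]
      · rw [if_neg h2]
        have hcons : pvExtract (c :: rest) = pvExtract rest := by
          rw [pvExtract_cons]
          simp only [pvStep1]
          rw [if_pos h1, if_neg h2]
          rfl
        rw [hcons, ih]
    · rw [if_neg h1]
      have hcons : pvExtract (c :: rest) = pvExtract rest := by
        rw [pvExtract_cons]
        simp only [pvStep1]
        rw [if_neg h1]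
        rfl
      rw [hcons, ih]

theorem pvOfList_all_eq (h : String) (t : List String) (hall : ∀ x ∈ t, x = h) :
    PySem.Set.ofList (h :: t) = [h] := by
  induction t with
  | nil => rfl
  | cons a t ih =>
    have ha : a = h := hall a (by simp)
    have := ih (fun x hx => hall x (by simp [hx]))
    rw [PySem.Set.ofList] at *
    simp only [List.foldl] at *
    subst ha
    simpa [PySem.Set.add, PySem.Set.contains] using this

theorem pvOfList_two_le (h x : String) (t : List String) (hx : x ∈ t) (hne : x ≠ h) :
    2 ≤ (PySem.Set.ofList (h :: t)).length := by
  have hmemh : h ∈ PySem.Set.ofList (h :: t) := by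
    rw [PySem.Set.mem_ofList]; simp
  have hmemx : x ∈ PySem.Set.ofList (h :: t) := by
    rw [PySem.Set.mem_ofList]; simp [hx]
  rcases hl : PySem.Set.ofList (h :: t) with _ | ⟨y, _ | ⟨z, zs⟩⟩
  · simp [hl] at hmemh
  · rw [hl] at hmemh hmemx
    simp at hmemh hmemx
    exact absurd (hmemx.trans hmemh.symm) hne
  · simp

-- ===== VERDICT (by name: the statement is the Claim_ definition above) =====
theorem infer_service_from_checks_spec : Claim_equal_infer_service_from_checks := by
  intro checks _
  unfold Spec_infer_service_from_checks infer_service_from_checks infer_service_from_checks_alt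
  split_ifs with hg
  · rfl
  · rw [pvAFold_eq, pvBLoop_none]
    have hof : (pvExtract ((PySem.Str.split? checks ";").getD [])).foldl PySem.Set.add PySem.Set.empty
        = PySem.Set.ofList (pvExtract ((PySem.Str.split? checks ";").getD [])) := by
      rw [PySem.Set.ofList_eq_foldl]; rfl
    rw [hof]
    rcases hE : pvExtract ((PySem.Str.split? checks ";").getD []) with _ | ⟨h, t⟩
    · rfl
    · by_cases hall : ∀ x ∈ t, x = h
      · have h1 : PySem.Set.ofList (h :: t) = [h] := pvOfList_all_eq h t hall
        have ht : t.all (· == h) = true := by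
          simp only [List.all_eq_true, beq_iff_eq]; exact hall
        simp [h1, ht]
      · push Not at hall
        obtain ⟨x, hx, hne⟩ := hall
        have h2 := pvOfList_two_le h x t hx hne
        have ht : t.all (· == h) = false := by
          simp only [List.all_eq_false]
          exact ⟨x, hx, by simpa using hne⟩
        have hlen0 : (PySem.Set.ofList (h :: t)).length ≠ 0 := by omega
        have hlen1 : (PySem.Set.ofList (h :: t)).length ≠ 1 := by omega
        simp [hlen0, hlen1, ht]
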